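-- pv_equiv track=rewrite | github.com/john-harrold/aerialist | Spindrift/Spindrift/Resources/pdf2docx_convert.py | _apply_char_remaps
-- ===== SOURCE A (Python) =====
-- def _apply_char_remaps(text, font_name, char_remaps):
--     """Apply character-level remapping to text from a specific font.
--
--     Handles three cases:
--     1. Simple 1:1 character replacement (e.g., '!' -> '→' in AdvP4C4E74)
--     2. Character deletion (remap value is None, e.g., combining marks)
--     3. Combining diacritical marks (e.g., € in AdvP4C4E59 = diaeresis on previous vowel)
--     """
--     if not text or font_name not in char_remaps:
--         return text
--
--     remap = char_remaps[font_name]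
--     result = list(text)
--     i = 0
--     while i < len(result):
--         ch = result[i]
--         if ch in remap:
--             replacement = remap[ch]
--             if replacement is None:
--                 # Delete this character (combining mark artifact)
--                 result.pop(i)
--                 continue
--             else:
--                 result[i] = replacement
--         i += 1
--
--     return ''.join(result)
-- ===== SOURCE B (Python) =====
-- def _apply_char_remaps(text, font_name, char_remaps):
--     """Apply character-level remapping to text from a specific font.
--
--     Idiomatic rewrite: build an ordinal-keyed translation table once and let
--     str.translate do a single table-driven pass (None deletes, str replaces,
--     absent chars pass through). Multi-char keys are filtered out; they could
--     never match a single character in the original loop either.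
--     """
--     if not text or font_name not in char_remaps:
--         return text
--     remap = char_remaps[font_name]
--     table = {ord(k): v for k, v in remap.items() if len(k) == 1}
--     return text.translate(table)
-- ===== Notes on version B (the rewrite author's own statement) =====
-- stated objective: idiomatic
-- what changed: Replaces the index-walking loop that mutates a list in place (pop/assign/continue) with a translation table built once from the single-char remap keys and applied in one table-driven pass over the text (str.translate).
import Mathlib
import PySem

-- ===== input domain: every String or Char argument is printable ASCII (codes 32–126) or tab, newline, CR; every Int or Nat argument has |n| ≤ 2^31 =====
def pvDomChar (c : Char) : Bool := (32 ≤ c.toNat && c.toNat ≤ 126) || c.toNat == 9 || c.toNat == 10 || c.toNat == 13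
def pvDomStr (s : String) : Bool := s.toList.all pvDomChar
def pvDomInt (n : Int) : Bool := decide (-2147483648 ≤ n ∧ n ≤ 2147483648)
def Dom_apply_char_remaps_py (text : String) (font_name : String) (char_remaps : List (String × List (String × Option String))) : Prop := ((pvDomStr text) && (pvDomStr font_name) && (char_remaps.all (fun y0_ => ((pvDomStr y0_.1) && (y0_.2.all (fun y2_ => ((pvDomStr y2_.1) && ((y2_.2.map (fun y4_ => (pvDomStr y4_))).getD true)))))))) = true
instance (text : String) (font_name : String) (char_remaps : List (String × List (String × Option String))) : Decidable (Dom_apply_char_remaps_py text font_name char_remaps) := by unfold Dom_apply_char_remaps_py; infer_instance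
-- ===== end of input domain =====

-- B replaces A's index-walking loop over a mutable list with a translation table
-- built once (single-char keys mapped to their replacement/deletion) applied in
-- one pass over the characters; more idiomatic, same results.

-- ===== PORT A =====
-- the while loop over `result` with `pop`/`continue`: recursion over the suffix
-- of the list of 1-char strings; `ch in remap` / `remap[ch]` is first-match lookup
def pvALoop (remap : List (String × Option String)) : List String → List String
  | [] => []
  | ch :: rest =>
    match remap.lookup ch with
    | none => ch :: pvALoop remap rest              -- ch not in remap: i += 1
    | some none => pvALoop remap rest               -- replacement is None: pop, continue
    | some (some r) => r :: pvALoop remap rest      -- result[i] = replacement; i += 1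

def apply_char_remaps_py (text : String) (font_name : String) (char_remaps : List (String × List (String × Option String))) : String :=
  if text = "" then text
  else
    match char_remaps.lookup font_name with
    | none => text
    | some remap =>
      PySem.Str.join "" (pvALoop remap (text.toList.map (fun c => String.ofList [c])))

-- ===== PORT B =====
-- table = {ord(k): v for k, v in remap.items() if len(k) == 1}
def pvBTable (remap : List (String × Option String)) : List (Char × Option String) :=
  remap.filterMap (fun kv =>
    match kv.1.toList with
    | [c] => some (c, kv.2)
    | _ => none)

-- text.translate(table): one pass, keyed by code point; None deletes, str replaces
def pvBTranslate (table : List (Char × Option String)) (cs : List Char) : List Char :=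
  cs.flatMap (fun c =>
    match table.lookup c with
    | none => [c]
    | some none => []
    | some (some r) => r.toList)

def apply_char_remaps_py_alt (text : String) (font_name : String) (char_remaps : List (String × List (String × Option String))) : String :=
  if text = "" then text
  else
    match char_remaps.lookup font_name with
    | none => text
    | some remap => String.ofList (pvBTranslate (pvBTable remap) text.toList)

-- ===== PRECONDITION & SPEC =====
def Spec_apply_char_remaps_py (text : String) (font_name : String) (char_remaps : List (String × List (String × Option String))) (out : String) : Prop := out = apply_char_remaps_py_alt text font_name char_remaps
instance (text : String) (font_name : String) (char_remaps : List (String × List (String × Option String))) (out : String) : Decidable (Spec_apply_char_remaps_py text font_name char_remaps out) := by unfold Spec_apply_char_remaps_py; infer_instance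

-- ===== CLAIM (what is proved, stated in full; the proofs are below) =====
def Claim_equal_apply_char_remaps_py : Prop := ∀ (text : String) (font_name : String) (char_remaps : List (String × List (String × Option String))), Dom_apply_char_remaps_py text font_name char_remaps → Spec_apply_char_remaps_py text font_name char_remaps (apply_char_remaps_py text font_name char_remaps)

-- ===== LEMMAS AND PROOFS =====

-- looking a character up in B's filtered table = looking its 1-char string up in the remap
theorem pvBTable_lookup (remap : List (String × Option String)) (c : Char) :
    (pvBTable remap).lookup c = remap.lookup (String.ofList [c]) := by
  induction remap with
  | nil => rfl
  | cons kv rest ih =>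
    obtain ⟨k, v⟩ := kv
    by_cases hk : k = String.ofList [c]
    · subst hk; simp [pvBTable, List.lookup]
    · have hk' : k.toList ≠ [c] := by
        intro h; exact hk (String.toList_inj.mp (by simpa using h))
      have hbeq : (String.ofList [c] == k) = false := by
        simp only [beq_eq_false_iff_ne]; exact fun h => hk h.symm
      match hkl : k.toList with
      | [] => simpa [pvBTable, List.lookup, hkl, hbeq] using ih
      | [c'] =>
        have hcc : (c == c') = false := by
          simp only [beq_eq_false_iff_ne]; intro h; subst h; exact hk' hkl
        simpa [pvBTable, List.lookup, hkl, hcc, hbeq] using ih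
      | c' :: c'' :: t => simpa [pvBTable, List.lookup, hkl, hbeq] using ih

theorem intercalate_nil_eq_flatten (xss : List (List Char)) :
    ([] : List Char).intercalate xss = xss.flatten := by
  induction xss with
  | nil => simp [List.intercalate]
  | cons a r ih => cases r <;> simp_all [List.intercalate, List.intersperse]

-- the joined output of A's loop is B's single translate pass
theorem pvLoop_eq_translate (remap : List (String × Option String)) (cs : List Char) :
    ((pvALoop remap (cs.map (fun c => String.ofList [c]))).map String.toList).flatten
      = pvBTranslate (pvBTable remap) cs := by
  induction cs with
  | nil => rfl
  | cons c rest ih =>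
    simp only [pvBTranslate] at ih ⊢
    simp only [List.map_cons, pvALoop, List.flatMap_cons]
    rw [← pvBTable_lookup]
    cases h : (pvBTable remap).lookup c with
    | none => simp [ih]
    | some v => cases v with
      | none => simp [ih]
      | some r => simp [ih]

-- ===== VERDICT (by name: the statement is the Claim_ definition above) =====
theorem apply_char_remaps_py_spec : Claim_equal_apply_char_remaps_py := by
  intro text font_name char_remaps _
  unfold Spec_apply_char_remaps_py apply_char_remaps_py apply_char_remaps_py_alt
  by_cases ht : text = ""
  · simp [ht]
  · simp only [ht, if_false]
    cases h : char_remaps.lookup font_name with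
    | none => rfl
    | some remap =>
      apply String.toList_inj.mp
      rw [PySem.Str.toList_join]
      show PySem.Chars.join "".toList _ = _
      have : ("" : String).toList = [] := rfl
      rw [this]
      simp only [PySem.Chars.join, intercalate_nil_eq_flatten]
      rw [pvLoop_eq_translate]
      exact String.toList_ofList.symm
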